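-- pv_equiv track=rewrite | github.com/dansilx/grokkalgo | bubblesortmiddle/gimme.py | gimme
-- ===== SOURCE A (Python) =====
-- def gimme(arr):
--     sorted = list(arr) # guarda a array em uma variavel
--     for i in range(0, len(sorted)):
--         for j in range(i+1, len(sorted)):
--             if sorted[i] > sorted[j]:
--                 temp = sorted[i]
--                 sorted[i] = sorted[j]
--                 sorted[j] = temp
--     mid = sorted[1]
--     for i in range(len(arr)):
--         if arr[i] == mid:
--             return i
-- ===== SOURCE B (Python) =====
-- def gimme(arr):
--     a, b, *rest = arr
--     m1, m2 = (a, b) if a <= b else (b, a)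
--     for x in rest:
--         if x < m1:
--             m1, m2 = x, m1
--         elif x < m2:
--             m2 = x
--     return arr.index(m2)
-- ===== Notes on version B (the rewrite author's own statement) =====
-- stated objective: faster
-- what changed: Replaced the O(n^2) exchange sort (to read the second-smallest value) by a single left-to-right scan maintaining the two smallest values, followed by list.index for its first position.
import Mathlib
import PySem

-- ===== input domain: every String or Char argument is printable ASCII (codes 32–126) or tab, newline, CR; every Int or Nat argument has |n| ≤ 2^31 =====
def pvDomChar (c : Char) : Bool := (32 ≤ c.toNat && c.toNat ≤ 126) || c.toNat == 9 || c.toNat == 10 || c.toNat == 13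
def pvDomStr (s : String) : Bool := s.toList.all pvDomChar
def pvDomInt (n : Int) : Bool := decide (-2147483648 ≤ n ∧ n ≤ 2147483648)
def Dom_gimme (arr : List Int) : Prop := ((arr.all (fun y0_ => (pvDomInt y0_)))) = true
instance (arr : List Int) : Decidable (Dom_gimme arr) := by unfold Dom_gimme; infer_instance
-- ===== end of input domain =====

-- B computes the second-smallest value with one linear scan instead of A's quadratic exchange sort (objective: faster).


-- ===== PORT A =====
-- body of the inner 'for j' loop: compare sorted[i] with sorted[j] and swap; indices are always
-- in range here, so pyGetD/pySetD (the total forms) are exact.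
def gimmeStep (i : Int) (s : List Int) (j : Int) : List Int :=
  if PySem.List.pyGetD s i 0 > PySem.List.pyGetD s j 0 then
    let temp := PySem.List.pyGetD s i 0
    let s' := PySem.List.pySetD s i (PySem.List.pyGetD s j 0)
    PySem.List.pySetD s' j temp
  else s

-- 'for j in range(i+1, len(sorted))'
def gimmeInner (i : Int) (s : List Int) : List Int :=
  (PySem.List.pyRange (i + 1) (s.length : Int) 1).foldl (gimmeStep i) s

-- 'for i in range(len(arr)): if arr[i] == mid: return i'  (the counter i carried along the scan;
-- none = the fall-through where Python would return None — unreachable, since mid is an element of arr)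
def gimmeFind : List Int → Int → Int → Option Int
  | [], _, _ => none
  | x :: xs, mid, i => if x = mid then some i else gimmeFind xs mid (i + 1)

def gimme (arr : List Int) : Int :=
  match PySem.List.pyGet? ((PySem.List.pyRange 0 (arr.length : Int) 1).foldl
      (fun s i => gimmeInner i s) arr) 1 with   -- sorted[1]: IndexError when len(arr) < 2, excluded by Pre_
  | some mid => (gimmeFind arr mid 0).getD 0    -- default unreachable: the scan always finds mid
  | none => 0

-- ===== PORT B =====
def gimme_alt (arr : List Int) : Int :=
  match arr with
  | a :: b :: rest =>   -- 'a, b, *rest = arr'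
      let init := if a ≤ b then (a, b) else (b, a)
      let p := rest.foldl
        (fun (p : Int × Int) x =>
          if x < p.1 then (x, p.1) else if x < p.2 then (p.1, x) else p) init
      ((PySem.List.index? arr p.2).getD 0 : Nat)   -- arr.index(m2); m2 is always present, default unreachable
  | _ => 0   -- Python: ValueError from the unpacking; excluded by Pre_

-- ===== PRECONDITION & SPEC =====
-- Pre_: Python A raises IndexError (sorted[1]) when the list has fewer than two elements.
def Pre_gimme (arr : List Int) : Prop := 2 ≤ arr.length
instance (arr : List Int) : Decidable (Pre_gimme arr) := by unfold Pre_gimme; infer_instance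
def pvWitness_gimme : List Int := [3, 1, 2]

def Spec_gimme (arr : List Int) (out : Int) : Prop := out = gimme_alt arr
instance (arr : List Int) (out : Int) : Decidable (Spec_gimme arr out) := by unfold Spec_gimme; infer_instance

-- ===== CLAIM (what is proved, stated in full; the proofs are below) =====
def Claim_equal_gimme : Prop := ∀ (arr : List Int), Dom_gimme arr → Pre_gimme arr → Spec_gimme arr (gimme arr)

-- ===== LEMMAS AND PROOFS =====

-- Reads/writes of A's loop body at positions described by an append split.
lemma getD_at (pre t : List Int) (c : Int) :
    PySem.List.pyGetD (pre ++ c :: t) (pre.length : Int) 0 = c := by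
  simp [pysem]

lemma setD_at (pre t : List Int) (c v : Int) :
    PySem.List.pySetD (pre ++ c :: t) (pre.length : Int) v = pre ++ v :: t := by
  simp [pysem]

-- Structural reformulation of one inner pass: carry the current minimum, emit displaced elements in place.
def innerPass : Int → List Int → Int × List Int
  | c, [] => (c, [])
  | c, x :: xs =>
      if c > x then let p := innerPass x xs; (p.1, c :: p.2)
      else let p := innerPass c xs; (p.1, x :: p.2)

lemma innerPass_len (c : Int) (l : List Int) : (innerPass c l).2.length = l.length := by
  induction l generalizing c with
  | nil => rfl
  | cons x xs ih => simp only [innerPass]; split <;> simp [ih]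

-- Structural reformulation of A's whole exchange sort.
def sortA : List Int → List Int
  | [] => []
  | c :: l => (innerPass c l).1 :: sortA (innerPass c l).2
termination_by l => l.length
decreasing_by simp [innerPass_len]

-- What one step of the inner loop does to a state split as pre ++ [current] ++ mid ++ [next] ++ suf.
lemma gimmeStep_action (pre mid suf : List Int) (c x : Int) :
    gimmeStep (pre.length : Int) (pre ++ c :: mid ++ x :: suf) ((pre ++ c :: mid).length : Int)
      = if c > x then pre ++ x :: mid ++ c :: suf else pre ++ c :: mid ++ x :: suf := by
  have h1 : PySem.List.pyGetD (pre ++ c :: mid ++ x :: suf) (pre.length : Int) 0 = c := by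
    have := getD_at pre (mid ++ x :: suf) c; simpa using this
  have h2 : PySem.List.pyGetD (pre ++ c :: mid ++ x :: suf) ((pre ++ c :: mid).length : Int) 0 = x := by
    have := getD_at (pre ++ c :: mid) suf x; simpa using this
  unfold gimmeStep
  rw [h1, h2]
  split
  · have s1 : PySem.List.pySetD (pre ++ c :: mid ++ x :: suf) (pre.length : Int) x
        = pre ++ x :: mid ++ x :: suf := by
      have := setD_at pre (mid ++ x :: suf) c x; simpa using this
    rw [s1]
    have s2 : PySem.List.pySetD (pre ++ x :: mid ++ x :: suf) ((pre ++ c :: mid).length : Int) c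
        = pre ++ x :: mid ++ c :: suf := by
      have hlen : ((pre ++ c :: mid).length : Int) = ((pre ++ x :: mid).length : Int) := by simp
      rw [hlen]
      have := setD_at (pre ++ x :: mid) suf x c; simpa using this
    rw [s2]
  · rfl

-- The inner index loop from j = |pre|+1+|mid| equals the structural innerPass on the suffix.
lemma innerFold_go {pre : List Int} (suf : List Int) : ∀ (mid : List Int) (c : Int) (a n : Int),
    a = pre.length + 1 + mid.length →
    n = pre.length + 1 + mid.length + suf.length →
    (PySem.List.pyRange a n 1).foldl (gimmeStep (pre.length : Int)) (pre ++ c :: mid ++ suf)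
      = pre ++ (innerPass c suf).1 :: mid ++ (innerPass c suf).2 := by
  induction suf with
  | nil =>
      intro mid c a n ha hn
      rw [PySem.List.pyRange_one_eq_nil (by simp at hn; omega)]
      simp [innerPass]
  | cons x xs ih =>
      intro mid c a n ha hn
      rw [PySem.List.pyRange_one_cons (by simp at hn ⊢; omega)]
      rw [List.foldl_cons]
      have hstep : gimmeStep (pre.length : Int) (pre ++ c :: mid ++ x :: xs) a
          = if c > x then pre ++ x :: mid ++ c :: xs else pre ++ c :: mid ++ x :: xs := by
        have hax : a = ((pre ++ c :: mid).length : Int) := by simp [ha]; omega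
        rw [hax]
        exact gimmeStep_action pre mid xs c x
      rw [hstep]
      by_cases hcx : c > x
      · rw [if_pos hcx]
        have e1 : pre ++ x :: mid ++ c :: xs = pre ++ x :: (mid ++ [c]) ++ xs := by simp
        rw [e1]
        rw [ih (mid ++ [c]) x (a+1) n (by simp [ha]; omega) (by simp at hn ⊢; omega)]
        simp [innerPass, hcx]
      · rw [if_neg hcx]
        have e1 : pre ++ c :: mid ++ x :: xs = pre ++ c :: (mid ++ [x]) ++ xs := by simp
        rw [e1]
        rw [ih (mid ++ [x]) c (a+1) n (by simp [ha]; omega) (by simp at hn ⊢; omega)]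
        simp [innerPass, hcx]

lemma gimmeInner_eq (pre suf : List Int) (c : Int) :
    gimmeInner (pre.length : Int) (pre ++ c :: suf)
      = pre ++ (innerPass c suf).1 :: (innerPass c suf).2 := by
  unfold gimmeInner
  have := innerFold_go (pre := pre) suf [] c ((pre.length : Int) + 1)
    (((pre ++ c :: suf).length : Nat) : Int) (by simp) (by simp; omega)
  simpa using this

-- The outer index loop from i = |pre| equals sortA on the unsorted suffix.
lemma outerFold_go : ∀ (k : Nat) (suf pre : List Int) (a b : Int),
    suf.length = k → a = pre.length → b = pre.length + suf.length →
    (PySem.List.pyRange a b 1).foldl (fun s i => gimmeInner i s) (pre ++ suf)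
      = pre ++ sortA suf := by
  intro k
  induction k with
  | zero =>
      intro suf pre a b hk ha hb
      rw [List.length_eq_zero_iff] at hk; subst hk
      rw [PySem.List.pyRange_one_eq_nil (by simp at hb; omega)]
      simp [sortA]
  | succ n ih =>
      intro suf pre a b hk ha hb
      cases suf with
      | nil => simp at hk
      | cons c rest =>
          rw [PySem.List.pyRange_one_cons (by simp at hb hk ⊢; omega)]
          rw [List.foldl_cons]
          subst ha
          rw [gimmeInner_eq pre rest c]
          have e1 : pre ++ (innerPass c rest).1 :: (innerPass c rest).2
              = (pre ++ [(innerPass c rest).1]) ++ (innerPass c rest).2 := by simp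
          rw [e1]
          rw [ih (innerPass c rest).2 (pre ++ [(innerPass c rest).1]) _ b
            (by simp [innerPass_len]; simp at hk; omega)
            (by simp)
            (by simp [innerPass_len]; simp at hb; omega)]
          simp [sortA]

lemma fold_eq_sortA (arr : List Int) :
    (PySem.List.pyRange 0 (arr.length : Int) 1).foldl (fun s i => gimmeInner i s) arr
      = sortA arr := by
  have := outerFold_go arr.length arr [] 0 (arr.length : Int) rfl (by simp) (by simp)
  simpa using this

-- The minimum carried out of an inner pass is a running minimum.
lemma innerPass_fst (c : Int) (l : List Int) : (innerPass c l).1 = l.foldl min c := by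
  induction l generalizing c with
  | nil => rfl
  | cons x xs ih =>
      simp only [innerPass, List.foldl_cons]
      split <;> rename_i h <;> rw [ih] <;> congr 1 <;> omega

-- B's two-smallest scan, in terms of A's inner pass: the first component is the pass's minimum,
-- the second the running minimum of the displaced elements.
lemma scanB (l : List Int) : ∀ (m1 m2 : Int), m1 ≤ m2 →
    l.foldl (fun (p : Int × Int) x =>
        if x < p.1 then (x, p.1) else if x < p.2 then (p.1, x) else p) (m1, m2)
      = ((innerPass m1 l).1, (innerPass m1 l).2.foldl min m2) := by
  induction l with
  | nil => intro m1 m2 h; rfl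
  | cons x xs ih =>
      intro m1 m2 h
      simp only [List.foldl_cons, innerPass]
      by_cases h1 : x < m1
      · rw [if_pos h1, if_pos (by omega : m1 > x)]
        rw [ih x m1 (by omega)]
        simp only [List.foldl_cons]
        congr 2
        omega
      · rw [if_neg h1, if_neg (by omega : ¬ m1 > x)]
        have e : (if x < m2 then (m1, x) else (m1, m2)) = (m1, min m2 x) := by
          split <;> rename_i h2 <;> congr 1 <;> omega
        rw [e, ih m1 (min m2 x) (by omega)]
        simp [List.foldl_cons]

-- A's index-scan is list.index shifted by the start counter.
lemma gimmeFind_eq (l : List Int) : ∀ (v : Int) (i : Int),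
    gimmeFind l v i = (PySem.List.index? l v).map (fun k : Nat => i + (k : Int)) := by
  induction l with
  | nil => intro v i; rfl
  | cons x xs ih =>
      intro v i
      by_cases h : x = v
      · subst h
        rw [PySem.List.index?_cons_self]
        simp [gimmeFind]
      · rw [PySem.List.index?_cons_of_ne xs h]
        simp only [gimmeFind, if_neg h, ih v (i + 1), Option.map_map]
        cases PySem.List.index? xs v <;> simp <;> omega

-- ===== VERDICT (by name: the statement is the Claim_ definition above) =====
theorem gimme_spec : Claim_equal_gimme := by
  intro arr _ hpre
  unfold Spec_gimme
  unfold Pre_gimme at hpre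
  match arr, hpre with
  | a :: b :: rest, _ =>
    show gimme (a :: b :: rest) = gimme_alt (a :: b :: rest)
    unfold gimme
    rw [fold_eq_sortA]
    cases hte : (innerPass a (b :: rest)).2 with
    | nil =>
        exfalso
        have := innerPass_len a (b :: rest)
        rw [hte] at this
        simp at this
    | cons c u =>
      have hsort : sortA (a :: b :: rest)
          = (innerPass a (b :: rest)).1 :: (innerPass c u).1 :: sortA (innerPass c u).2 := by
        rw [sortA, hte, sortA]
      rw [hsort]
      have hget : PySem.List.pyGet? ((innerPass a (b :: rest)).1 :: (innerPass c u).1 ::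
          sortA (innerPass c u).2) 1 = some (innerPass c u).1 := by simp [pysem]
      rw [hget]
      show (gimmeFind (a :: b :: rest) (innerPass c u).1 0).getD 0 = _
      show _ = (((PySem.List.index? (a :: b :: rest)
          (rest.foldl (fun (p : Int × Int) x =>
            if x < p.1 then (x, p.1) else if x < p.2 then (p.1, x) else p)
            (if a ≤ b then (a, b) else (b, a))).2).getD 0 : Nat) : Int)
      by_cases hab : a ≤ b
      · rw [if_pos hab, scanB rest a b hab]
        have hstep : innerPass a (b :: rest) = ((innerPass a rest).1, b :: (innerPass a rest).2) := by
          rw [innerPass, if_neg (by omega)]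
        rw [hstep] at hte
        obtain ⟨hc, hu⟩ := List.cons.injEq _ _ _ _ ▸ hte
        subst hc hu
        rw [innerPass_fst, gimmeFind_eq]
        cases PySem.List.index? (a :: b :: rest) ((innerPass a rest).2.foldl min b) <;> simp
      · rw [if_neg hab, scanB rest b a (by omega)]
        have hstep : innerPass a (b :: rest) = ((innerPass b rest).1, a :: (innerPass b rest).2) := by
          rw [innerPass, if_pos (by omega)]
        rw [hstep] at hte
        obtain ⟨hc, hu⟩ := List.cons.injEq _ _ _ _ ▸ hte
        subst hc hu
        rw [innerPass_fst, gimmeFind_eq]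
        cases PySem.List.index? (a :: b :: rest) ((innerPass b rest).2.foldl min a) <;> simp
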